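-- pv_equiv track=rewrite | github.com/martyav/adventofcode2018 | day_05/solution.py | reacted_polymer_length
-- ===== SOURCE A (Python) =====
-- def reacted_polymer_length(text):
--     new_text = ''
--     alphabet = 'abcdefghijklmnopqrstuvwxyz'
--
--     while new_text != text:
--         new_text = text
--
--         for letter in alphabet:
--             lower_first = f'{letter}{letter.upper()}'
--             upper_first = f'{letter.upper()}{letter}'
--
--             text = text.replace(lower_first,"")
--             text = text.replace(upper_first,"")
--
--     return len(new_text)
-- ===== SOURCE B (Python) =====
-- def reacted_polymer_length(text):
--     stack = []
--     for c in text: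
--         if stack and stack[-1] != c and stack[-1].lower() == c.lower():
--             stack.pop()
--         else:
--             stack.append(c)
--     return len(stack)
-- ===== Notes on version B (the rewrite author's own statement) =====
-- stated objective: alternative
-- what changed: Replaced the repeat-str.replace-until-fixpoint loop over all 52 two-letter patterns with a single left-to-right pass maintaining a stack that cancels adjacent opposite-case pairs.
import Mathlib
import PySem

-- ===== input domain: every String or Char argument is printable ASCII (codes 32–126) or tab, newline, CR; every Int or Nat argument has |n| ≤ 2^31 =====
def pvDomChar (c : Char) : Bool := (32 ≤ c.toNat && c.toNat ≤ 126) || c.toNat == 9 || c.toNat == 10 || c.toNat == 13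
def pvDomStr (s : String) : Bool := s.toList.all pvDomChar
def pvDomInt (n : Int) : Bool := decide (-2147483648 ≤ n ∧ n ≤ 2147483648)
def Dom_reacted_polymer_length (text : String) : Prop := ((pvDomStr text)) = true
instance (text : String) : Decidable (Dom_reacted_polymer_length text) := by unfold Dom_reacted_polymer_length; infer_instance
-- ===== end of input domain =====

-- B replaces A's repeat-str.replace-until-fixpoint scan with a single left-to-right stack pass; same return value.

-- ===== PORT A =====

def pvAlphabet : String := "abcdefghijklmnopqrstuvwxyz"

-- the body of A's inner `for letter in alphabet` loop
def pvPassBody (t : String) (letter : Char) : String :=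
  let lower_first : String := String.ofList [letter, PySem.Chars.upperChar letter]
  let upper_first : String := String.ofList [PySem.Chars.upperChar letter, letter]
  PySem.Str.replace (PySem.Str.replace t lower_first "") upper_first ""

-- one full iteration of A's `while` loop body (the 26-letter `for` loop)
def pvPass (text : String) : String :=
  pvAlphabet.toList.foldl pvPassBody text

-- length lemmas cited by pvLoop's termination proof (str.replace with "" never lengthens)
theorem pv_go_len_le (old : List Char) :
    ∀ (fuel : Nat) (l acc : List Char),
      (PySem.Chars.replace.go old [] fuel l acc).length ≤ acc.length + l.length := by
  intro fuel
  induction fuel with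
  | zero => intro l acc; simp [PySem.Chars.replace.go]
  | succ n ih =>
    intro l acc
    cases l with
    | nil => simp [PySem.Chars.replace.go]
    | cons c t =>
      simp only [PySem.Chars.replace.go]
      split
      · have h := ih (List.drop old.length (c :: t)) (List.reverse [] ++ acc)
        simp only [List.reverse_nil, List.nil_append] at h
        have hd : (List.drop old.length (c :: t)).length ≤ (c :: t).length := by
          simp [List.length_drop]
        calc (PySem.Chars.replace.go old [] n (List.drop old.length (c :: t)) acc).length
            ≤ acc.length + (List.drop old.length (c :: t)).length := h
          _ ≤ acc.length + (c :: t).length := by omega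
      · have h := ih t (c :: acc)
        simp only [List.length_cons] at h ⊢
        omega

theorem pv_go_eq_of_len (old : List Char) (hold : old ≠ []) :
    ∀ (fuel : Nat) (l acc : List Char),
      (PySem.Chars.replace.go old [] fuel l acc).length = acc.length + l.length →
      PySem.Chars.replace.go old [] fuel l acc = acc.reverse ++ l := by
  intro fuel
  induction fuel with
  | zero => intro l acc _; simp [PySem.Chars.replace.go]
  | succ n ih =>
    intro l acc h
    cases l with
    | nil => simp [PySem.Chars.replace.go]
    | cons c t =>
      simp only [PySem.Chars.replace.go] at h ⊢
      split at h <;> rename_i hbr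
      · exfalso
        have hle := pv_go_len_le old n (List.drop old.length (c :: t)) (List.reverse [] ++ acc)
        simp only [List.reverse_nil, List.nil_append] at hle h
        have hpos : 0 < old.length := List.length_pos_iff.mpr hold
        have hd : (List.drop old.length (c :: t)).length ≤ t.length := by
          simp [List.length_drop]; omega
        simp only [List.length_cons] at h
        omega
      · rw [if_neg hbr]
        have h' : (PySem.Chars.replace.go old [] n t (c :: acc)).length
            = (c :: acc).length + t.length := by
          simp only [List.length_cons] at h ⊢; omega
        rw [ih t (c :: acc) h']
        simp

theorem pv_replace_len_le (l old : List Char) (hold : old ≠ []) :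
    (PySem.Chars.replace l old []).length ≤ l.length := by
  cases old with
  | nil => exact absurd rfl hold
  | cons x o =>
    simp only [PySem.Chars.replace, List.isEmpty_cons]
    have h := pv_go_len_le (x :: o) l.length l []
    simpa using h

theorem pv_replace_eq_of_len (l old : List Char) (hold : old ≠ [])
    (h : (PySem.Chars.replace l old []).length = l.length) :
    PySem.Chars.replace l old [] = l := by
  cases old with
  | nil => exact absurd rfl hold
  | cons x o =>
    simp only [PySem.Chars.replace, List.isEmpty_cons] at h ⊢
    have := pv_go_eq_of_len (x :: o) hold l.length l [] (by simpa using h)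
    simpa using this

theorem pv_passBody_toList (t : String) (a : Char) :
    (pvPassBody t a).toList =
      PySem.Chars.replace
        (PySem.Chars.replace t.toList [a, PySem.Chars.upperChar a] [])
        [PySem.Chars.upperChar a, a] [] := by
  unfold pvPassBody
  simp [PySem.Str.replace, String.toList_ofList]

theorem pv_passBody_len_le (t : String) (a : Char) :
    (pvPassBody t a).toList.length ≤ t.toList.length := by
  rw [pv_passBody_toList]
  have h1 := pv_replace_len_le t.toList [a, PySem.Chars.upperChar a] (by simp)
  have h2 := pv_replace_len_le (PySem.Chars.replace t.toList [a, PySem.Chars.upperChar a] [])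
      [PySem.Chars.upperChar a, a] (by simp)
  omega

theorem pv_passBody_eq_of_len (t : String) (a : Char)
    (h : (pvPassBody t a).toList.length = t.toList.length) :
    pvPassBody t a = t := by
  rw [pv_passBody_toList] at h
  have h1 := pv_replace_len_le t.toList [a, PySem.Chars.upperChar a] (by simp)
  have h2 := pv_replace_len_le (PySem.Chars.replace t.toList [a, PySem.Chars.upperChar a] [])
      [PySem.Chars.upperChar a, a] (by simp)
  have e1 : PySem.Chars.replace t.toList [a, PySem.Chars.upperChar a] [] = t.toList :=
    pv_replace_eq_of_len _ _ (by simp) (by omega)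
  rw [e1] at h
  have e2 : PySem.Chars.replace t.toList [PySem.Chars.upperChar a, a] [] = t.toList :=
    pv_replace_eq_of_len _ _ (by simp) (by omega)
  have : (pvPassBody t a).toList = t.toList := by
    rw [pv_passBody_toList, e1, e2]
  calc pvPassBody t a = String.ofList (pvPassBody t a).toList := String.ofList_toList.symm
    _ = String.ofList t.toList := by rw [this]
    _ = t := String.ofList_toList

theorem pv_foldl_passBody_len_le :
    ∀ (L : List Char) (t : String),
      (List.foldl pvPassBody t L).toList.length ≤ t.toList.length := by
  intro L
  induction L with
  | nil => intro t; simp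
  | cons a L ih =>
    intro t
    have h1 := ih (pvPassBody t a)
    have h2 := pv_passBody_len_le t a
    simpa using le_trans h1 h2

theorem pv_foldl_passBody_eq_of_len :
    ∀ (L : List Char) (t : String),
      (List.foldl pvPassBody t L).toList.length = t.toList.length →
      List.foldl pvPassBody t L = t := by
  intro L
  induction L with
  | nil => intro t _; rfl
  | cons a L ih =>
    intro t h
    simp only [List.foldl_cons] at h ⊢
    have h1 := pv_foldl_passBody_len_le L (pvPassBody t a)
    have h2 := pv_passBody_len_le t a
    have hb : pvPassBody t a = t := pv_passBody_eq_of_len t a (by omega)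
    rw [hb] at h ⊢
    exact ih t h

theorem pv_pass_len_lt (t : String) (h : pvPass t ≠ t) :
    (pvPass t).toList.length < t.toList.length := by
  have hle := pv_foldl_passBody_len_le pvAlphabet.toList t
  rcases lt_or_eq_of_le hle with hlt | heq
  · exact hlt
  · exact absurd (pv_foldl_passBody_eq_of_len pvAlphabet.toList t heq) h

-- A's `while new_text != text` loop; terminates because each changing pass strictly shortens the text
def pvLoop (new_text text : String) : Int :=
  if new_text = text then PySem.Str.len new_text
  else pvLoop text (pvPass text)
termination_by 2 * text.toList.length + (if new_text = text then 0 else 1)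
decreasing_by
  rename_i h
  by_cases hp : text = pvPass text
  · rw [if_neg h, ← hp]
    simp
  · have hlt := pv_pass_len_lt text (fun e => hp e.symm)
    rw [if_neg h]
    split <;> omega

def reacted_polymer_length (text : String) : Int := pvLoop "" text

-- ===== PORT B =====

-- B-side helper: the stack top reacts with the next char (same letter, opposite case)
def pvReacts (a b : Char) : Bool :=
  a != b && (PySem.Chars.lowerChar a == PySem.Chars.lowerChar b)

-- one step of B's `for c in text` loop
def pvStack (stack : List Char) (c : Char) : List Char :=
  match stack with
  | [] => [c]
  | top :: rest => if pvReacts top c then rest else c :: top :: rest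

def reacted_polymer_length_alt (text : String) : Int :=
  ((text.toList.foldl pvStack []).length : Int)

-- ===== PRECONDITION & SPEC =====
def Spec_reacted_polymer_length (text : String) (out : Int) : Prop := out = reacted_polymer_length_alt text
instance (text : String) (out : Int) : Decidable (Spec_reacted_polymer_length text out) := by unfold Spec_reacted_polymer_length; infer_instance

-- ===== CLAIM (what is proved, stated in full; the proofs are below) =====
def Claim_equal_reacted_polymer_length : Prop := ∀ (text : String), Dom_reacted_polymer_length text → Spec_reacted_polymer_length text (reacted_polymer_length text)

-- ===== LEMMAS AND PROOFS =====

-- a character list with no adjacent reacting pair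
def pvIrr (l : List Char) : Prop := List.IsChain (fun a b => pvReacts a b = false) l

theorem pv_char_eq_of_toNat (a b : Char) (h : a.toNat = b.toNat) : a = b := by
  rw [← Char.ofNat_toNat a, h, Char.ofNat_toNat]

theorem pv_char_le_iff (a b : Char) : a ≤ b ↔ a.toNat ≤ b.toNat := by
  rw [Char.le_def]
  exact UInt32.le_iff_toNat_le

theorem pv_reacts_iff (a b : Char) :
    pvReacts a b = true ↔ a ≠ b ∧ PySem.Chars.lowerChar a = PySem.Chars.lowerChar b := by
  simp [pvReacts, bne_iff_ne]

theorem pv_lower_toNat (c : Char) :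
    (PySem.Chars.lowerChar c).toNat =
      if 65 ≤ c.toNat ∧ c.toNat ≤ 90 then c.toNat + 32 else c.toNat := by
  unfold PySem.Chars.lowerChar PySem.Chars.isupper
  have hA : ('A' : Char).toNat = 65 := rfl
  have hZ : ('Z' : Char).toNat = 90 := rfl
  by_cases h : 65 ≤ c.toNat ∧ c.toNat ≤ 90
  · rw [if_pos h]
    have hcond : (decide ('A' ≤ c) && decide (c ≤ 'Z')) = true := by
      simp only [Bool.and_eq_true, decide_eq_true_iff, pv_char_le_iff, hA, hZ]
      exact h
    rw [if_pos hcond, Char.toNat_ofNat, if_pos]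
    exact Or.inl (by omega)
  · rw [if_neg h]
    have hcond : ¬ ((decide ('A' ≤ c) && decide (c ≤ 'Z')) = true) := by
      simp only [Bool.and_eq_true, decide_eq_true_iff, pv_char_le_iff, hA, hZ]
      exact h
    rw [if_neg hcond]

theorem pv_upper_toNat (c : Char) :
    (PySem.Chars.upperChar c).toNat =
      if 97 ≤ c.toNat ∧ c.toNat ≤ 122 then c.toNat - 32 else c.toNat := by
  unfold PySem.Chars.upperChar PySem.Chars.islower
  have ha : ('a' : Char).toNat = 97 := rfl
  have hz : ('z' : Char).toNat = 122 := rfl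
  by_cases h : 97 ≤ c.toNat ∧ c.toNat ≤ 122
  · rw [if_pos h]
    have hcond : (decide ('a' ≤ c) && decide (c ≤ 'z')) = true := by
      simp only [Bool.and_eq_true, decide_eq_true_iff, pv_char_le_iff, ha, hz]
      exact h
    rw [if_pos hcond, Char.toNat_ofNat, if_pos]
    exact Or.inl (by omega)
  · rw [if_neg h]
    have hcond : ¬ ((decide ('a' ≤ c) && decide (c ≤ 'z')) = true) := by
      simp only [Bool.and_eq_true, decide_eq_true_iff, pv_char_le_iff, ha, hz]
      exact h
    rw [if_neg hcond]

theorem pv_reacts_comm (a b : Char) : pvReacts a b = pvReacts b a := by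
  rw [Bool.eq_iff_iff, pv_reacts_iff, pv_reacts_iff]
  constructor <;> rintro ⟨h1, h2⟩ <;> exact ⟨h1.symm, h2.symm⟩

theorem pv_reacts_unique {a b c : Char} (h1 : pvReacts a b = true) (h2 : pvReacts a c = true) :
    b = c := by
  rw [pv_reacts_iff] at h1 h2
  obtain ⟨hne1, hl1⟩ := h1
  obtain ⟨hne2, hl2⟩ := h2
  apply pv_char_eq_of_toNat
  have e1 : (PySem.Chars.lowerChar a).toNat = (PySem.Chars.lowerChar b).toNat := by rw [hl1]
  have e2 : (PySem.Chars.lowerChar a).toNat = (PySem.Chars.lowerChar c).toNat := by rw [hl2]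
  have nab : a.toNat ≠ b.toNat := fun e => hne1 (pv_char_eq_of_toNat a b e)
  have nac : a.toNat ≠ c.toNat := fun e => hne2 (pv_char_eq_of_toNat a c e)
  rw [pv_lower_toNat, pv_lower_toNat] at e1 e2
  split_ifs at e1 e2 <;> omega

theorem pv_alpha_toList : pvAlphabet.toList =
    ['a','b','c','d','e','f','g','h','i','j','k','l','m',
     'n','o','p','q','r','s','t','u','v','w','x','y','z'] := by decide

theorem pv_mem_alpha (c : Char) (h1 : 97 ≤ c.toNat) (h2 : c.toNat ≤ 122) :
    c ∈ pvAlphabet.toList := by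
  rw [← Char.ofNat_toNat c, pv_alpha_toList]
  obtain ⟨n, hn⟩ : ∃ n, c.toNat = n := ⟨_, rfl⟩
  rw [hn] at h1 h2 ⊢
  interval_cases n <;> decide

-- every reacting pair is one of A's 52 two-character patterns
theorem pv_reacts_classify {a b : Char} (h : pvReacts a b = true) :
    ∃ w ∈ pvAlphabet.toList,
      (a = w ∧ b = PySem.Chars.upperChar w) ∨ (a = PySem.Chars.upperChar w ∧ b = w) := by
  rw [pv_reacts_iff] at h
  obtain ⟨hne, hl⟩ := h
  have e : (PySem.Chars.lowerChar a).toNat = (PySem.Chars.lowerChar b).toNat := by rw [hl]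
  have nab : a.toNat ≠ b.toNat := fun e' => hne (pv_char_eq_of_toNat a b e')
  rw [pv_lower_toNat, pv_lower_toNat] at e
  split_ifs at e with hua hub hub
  · omega
  · refine ⟨b, pv_mem_alpha b (by omega) (by omega), Or.inr ⟨?_, rfl⟩⟩
    apply pv_char_eq_of_toNat
    rw [pv_upper_toNat, if_pos (by omega)]
    omega
  · refine ⟨a, pv_mem_alpha a (by omega) (by omega), Or.inl ⟨rfl, ?_⟩⟩
    apply pv_char_eq_of_toNat
    rw [pv_upper_toNat, if_pos (by omega)]
    omega
  · omega

theorem pv_ischain_of_infix {R : Char → Char → Prop} {l l1 : List Char}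
    (h : List.IsChain R l) (hs : l1 <:+: l) : List.IsChain R l1 := by
  obtain ⟨u, v, rfl⟩ := hs
  exact List.IsChain.prefix
    (List.IsChain.suffix h ⟨u, (List.append_assoc u l1 v).symm⟩)
    ⟨v, rfl⟩

theorem pv_irr_step {s : List Char} {c : Char} (h : pvIrr s) : pvIrr (pvStack s c) := by
  cases s with
  | nil => exact List.IsChain.singleton c
  | cons top rest =>
    show pvIrr (if pvReacts top c then rest else c :: top :: rest)
    split
    · exact pv_ischain_of_infix h (List.suffix_cons top rest).isInfix
    · rename_i hcr
      refine List.IsChain.cons_cons ?_ h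
      rw [pv_reacts_comm]
      exact Bool.not_eq_true _ ▸ (by simpa using hcr)

theorem pv_irr_foldl : ∀ (l s : List Char), pvIrr s → pvIrr (List.foldl pvStack s l) := by
  intro l
  induction l with
  | nil => intro s h; exact h
  | cons c t ih => intro s h; exact ih (pvStack s c) (pv_irr_step h)

theorem pv_cancel {a b : Char} (hab : pvReacts a b = true) :
    ∀ s : List Char, pvIrr s → pvStack (pvStack s a) b = s := by
  intro s hs
  cases s with
  | nil =>
    show pvStack [a] b = []
    simp [pvStack, hab]
  | cons h t =>
    show pvStack (if pvReacts h a then t else a :: h :: t) b = h :: t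
    by_cases hha : pvReacts h a = true
    · rw [if_pos hha]
      have hbh : b = h :=
        pv_reacts_unique hab ((pv_reacts_comm a h) ▸ hha)  -- pvReacts a h from pvReacts h a
      subst hbh
      cases t with
      | nil => rfl
      | cons h2 t2 =>
        show (if pvReacts h2 b then t2 else b :: h2 :: t2) = b :: h2 :: t2
        rw [if_neg]
        unfold pvIrr at hs
        rw [List.isChain_cons_cons] at hs
        rw [pv_reacts_comm]
        simp [hs.1]
    · rw [if_neg hha]
      show (if pvReacts a b then h :: t else b :: a :: h :: t) = h :: t
      rw [if_pos hab]

theorem pv_nf : ∀ (l s : List Char), pvIrr (l.reverse ++ s) →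
    List.foldl pvStack s l = l.reverse ++ s := by
  intro l
  induction l with
  | nil => intro s _; simp
  | cons c t ih =>
    intro s h
    have hstep : pvStack s c = c :: s := by
      cases s with
      | nil => rfl
      | cons h2 s' =>
        show (if pvReacts h2 c then s' else c :: h2 :: s') = c :: h2 :: s'
        rw [if_neg]
        have hinf : [c, h2] <:+: (c :: t).reverse ++ h2 :: s' := ⟨t.reverse, s', by simp⟩
        have hch := pv_ischain_of_infix h hinf
        rw [List.isChain_cons_cons] at hch
        rw [pv_reacts_comm]
        simp [hch.1]
    simp only [List.foldl_cons, hstep]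
    have h' : pvIrr (t.reverse ++ c :: s) := by
      have he : (c :: t).reverse ++ s = t.reverse ++ c :: s := by simp
      rwa [he] at h
    rw [ih (c :: s) h']
    simp

theorem pv_go_red {x y : Char} (hxy : pvReacts x y = true) :
    ∀ (fuel : Nat) (l acc s : List Char), pvIrr s →
      List.foldl pvStack s (PySem.Chars.replace.go [x, y] [] fuel l acc)
        = List.foldl pvStack (List.foldl pvStack s acc.reverse) l := by
  intro fuel
  induction fuel with
  | zero => intro l acc s _; simp [PySem.Chars.replace.go, List.foldl_append]
  | succ n ih =>
    intro l acc s hs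
    cases l with
    | nil => simp [PySem.Chars.replace.go]
    | cons c t =>
      simp only [PySem.Chars.replace.go]
      split <;> rename_i hpre
      · cases t with
        | nil => simp [List.isPrefixOf] at hpre
        | cons d t' =>
          have hcd : x = c ∧ y = d := by simpa [List.isPrefixOf] using hpre
          obtain ⟨hc, hd⟩ := hcd
          subst hc; subst hd
          have hrec := ih (List.drop ([x, y].length) (x :: y :: t')) (List.reverse [] ++ acc) s hs
          rw [hrec]
          simp only [List.reverse_nil, List.nil_append]
          rw [show List.drop ([x, y].length) (x :: y :: t') = t' from by simp]
          simp only [List.foldl_cons]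
          rw [pv_cancel hxy _ (pv_irr_foldl acc.reverse s hs)]
      · have hrec := ih t (c :: acc) s hs
        rw [hrec]
        simp [List.foldl_append]

theorem pv_replace_red {x y : Char} (hxy : pvReacts x y = true) (l s : List Char)
    (hs : pvIrr s) :
    List.foldl pvStack s (PySem.Chars.replace l [x, y] []) = List.foldl pvStack s l := by
  simp only [PySem.Chars.replace, List.isEmpty_cons]
  have := pv_go_red hxy l.length l [] s hs
  simpa using this

theorem pv_alpha_bounds : ∀ c ∈ pvAlphabet.toList, 97 ≤ c.toNat ∧ c.toNat ≤ 122 := by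
  rw [pv_alpha_toList]
  intro c hc
  fin_cases hc <;> exact ⟨by decide, by decide⟩

theorem pv_alpha_reacts : ∀ c ∈ pvAlphabet.toList,
    pvReacts c (PySem.Chars.upperChar c) = true ∧ pvReacts (PySem.Chars.upperChar c) c = true := by
  intro c hc
  obtain ⟨h1, h2⟩ := pv_alpha_bounds c hc
  have hu : (PySem.Chars.upperChar c).toNat = c.toNat - 32 := by
    rw [pv_upper_toNat, if_pos ⟨h1, h2⟩]
  have hne : c ≠ PySem.Chars.upperChar c := by
    intro e
    rw [← e] at hu
    omega
  have hlc : (PySem.Chars.lowerChar c).toNat = c.toNat := by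
    rw [pv_lower_toNat, if_neg (by omega)]
  have hlu : (PySem.Chars.lowerChar (PySem.Chars.upperChar c)).toNat = c.toNat := by
    rw [pv_lower_toNat, hu, if_pos (by omega)]
    omega
  have hl : PySem.Chars.lowerChar c = PySem.Chars.lowerChar (PySem.Chars.upperChar c) :=
    pv_char_eq_of_toNat _ _ (by rw [hlc, hlu])
  exact ⟨(pv_reacts_iff _ _).mpr ⟨hne, hl⟩,
    (pv_reacts_iff _ _).mpr ⟨fun e => hne e.symm, hl.symm⟩⟩

theorem pv_passBody_red (letter : Char) (hmem : letter ∈ pvAlphabet.toList)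
    (t : String) (s : List Char) (hs : pvIrr s) :
    List.foldl pvStack s (pvPassBody t letter).toList = List.foldl pvStack s t.toList := by
  obtain ⟨h1, h2⟩ := pv_alpha_reacts letter hmem
  rw [pv_passBody_toList]
  rw [pv_replace_red h2 _ s hs, pv_replace_red h1 _ s hs]

theorem pv_pass_foldl_red :
    ∀ (L : List Char), (∀ a ∈ L, a ∈ pvAlphabet.toList) →
      ∀ (t : String) (s : List Char), pvIrr s →
        List.foldl pvStack s (List.foldl pvPassBody t L).toList
          = List.foldl pvStack s t.toList := by
  intro L
  induction L with
  | nil => intro _ t s _; rfl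
  | cons a L ih =>
    intro hmem t s hs
    simp only [List.foldl_cons]
    rw [ih (fun b hb => hmem b (List.mem_cons_of_mem a hb)) (pvPassBody t a) s hs]
    exact pv_passBody_red a (hmem a List.mem_cons_self) t s hs

theorem pv_pass_red (t : String) (s : List Char) (hs : pvIrr s) :
    List.foldl pvStack s (pvPass t).toList = List.foldl pvStack s t.toList :=
  pv_pass_foldl_red pvAlphabet.toList (fun _ h => h) t s hs

theorem pv_go_lt_of_infix (old : List Char) (hold : old ≠ []) :
    ∀ (fuel : Nat) (l acc : List Char), l.length ≤ fuel → old <:+: l →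
      (PySem.Chars.replace.go old [] fuel l acc).length < acc.length + l.length := by
  intro fuel
  induction fuel with
  | zero =>
    intro l acc hf hinf
    have : l = [] := List.length_eq_zero_iff.mp (Nat.le_zero.mp hf)
    subst this
    exact absurd (List.infix_nil.mp hinf) hold
  | succ n ih =>
    intro l acc hf hinf
    cases l with
    | nil => exact absurd (List.infix_nil.mp hinf) hold
    | cons c t =>
      simp only [PySem.Chars.replace.go]
      split <;> rename_i hbr
      · have hle := pv_go_len_le old n (List.drop old.length (c :: t)) (List.reverse [] ++ acc)
        simp only [List.reverse_nil, List.nil_append] at hle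
        have hpos : 0 < old.length := List.length_pos_iff.mpr hold
        have hd : (List.drop old.length (c :: t)).length ≤ t.length := by
          simp [List.length_drop]; omega
        simp only [List.length_cons, List.reverse_nil, List.nil_append]
        omega
      · have hinft : old <:+: t := by
          rcases List.infix_cons_iff.mp hinf with hp | hinft
          · exact absurd (List.isPrefixOf_iff_prefix.mpr hp) (by simpa using hbr)
          · exact hinft
        have hft : t.length ≤ n := by
          simp only [List.length_cons] at hf; omega
        have := ih t (c :: acc) hft hinft
        simp only [List.length_cons] at this ⊢
        omega

theorem pv_replace_lt_of_infix (l old : List Char) (hold : old ≠ []) (hinf : old <:+: l) :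
    (PySem.Chars.replace l old []).length < l.length := by
  cases old with
  | nil => exact absurd rfl hold
  | cons x o =>
    simp only [PySem.Chars.replace, List.isEmpty_cons]
    have := pv_go_lt_of_infix (x :: o) hold l.length l [] le_rfl hinf
    simpa using this

theorem pv_no_infix_irr :
    ∀ l : List Char, (∀ a b : Char, pvReacts a b = true → ¬ ([a, b] <:+: l)) → pvIrr l := by
  intro l
  induction l with
  | nil => intro _; exact List.IsChain.nil
  | cons c t ih =>
    intro h
    cases t with
    | nil => exact List.IsChain.singleton c
    | cons d t' =>
      refine List.IsChain.cons_cons ?_ (ih ?_)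
      · rw [Bool.eq_false_iff]
        intro hcd
        exact h c d hcd ⟨[], t', by simp⟩
      · intro a b hab hinf
        exact h a b hab (hinf.trans (List.infix_cons (List.infix_refl _)))

theorem pv_foldl_passBody_fix :
    ∀ (L : List Char) (t : String), List.foldl pvPassBody t L = t →
      ∀ a ∈ L, pvPassBody t a = t := by
  intro L
  induction L with
  | nil => intro t _ a ha; exact absurd ha (List.not_mem_nil)
  | cons a L ih =>
    intro t h a' ha'
    simp only [List.foldl_cons] at h
    have h1 := pv_foldl_passBody_len_le L (pvPassBody t a)
    have h2 := pv_passBody_len_le t a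
    have hlen : (List.foldl pvPassBody (pvPassBody t a) L).toList.length = t.toList.length := by
      rw [h]
    have hb : pvPassBody t a = t := pv_passBody_eq_of_len t a (by omega)
    rw [hb] at h
    rcases List.mem_cons.mp ha' with he | hm
    · rw [he]; exact hb
    · exact ih t h a' hm

-- each of A's 52 patterns is an identity replace on a fixpoint of the full pass
theorem pv_fix_replace_id (t : String) (a : Char) (h : pvPassBody t a = t) :
    PySem.Chars.replace t.toList [a, PySem.Chars.upperChar a] [] = t.toList ∧
    PySem.Chars.replace t.toList [PySem.Chars.upperChar a, a] [] = t.toList := by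
  have htl : (pvPassBody t a).toList = t.toList := by rw [h]
  rw [pv_passBody_toList] at htl
  have h1 := pv_replace_len_le t.toList [a, PySem.Chars.upperChar a] (by simp)
  have h2 := pv_replace_len_le (PySem.Chars.replace t.toList [a, PySem.Chars.upperChar a] [])
      [PySem.Chars.upperChar a, a] (by simp)
  have hlen : (PySem.Chars.replace (PySem.Chars.replace t.toList [a, PySem.Chars.upperChar a] [])
      [PySem.Chars.upperChar a, a] []).length = t.toList.length := by rw [htl]
  have e1 : PySem.Chars.replace t.toList [a, PySem.Chars.upperChar a] [] = t.toList :=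
    pv_replace_eq_of_len _ _ (by simp) (by omega)
  rw [e1] at htl
  exact ⟨e1, htl⟩

-- a fixpoint of A's full pass has no adjacent reacting pair
theorem pv_fix_irr (t : String) (hfix : pvPass t = t) : pvIrr t.toList := by
  have hid : ∀ a ∈ pvAlphabet.toList, pvPassBody t a = t :=
    pv_foldl_passBody_fix pvAlphabet.toList t hfix
  apply pv_no_infix_irr
  intro a b hab hinf
  obtain ⟨w, hw, hcase⟩ := pv_reacts_classify hab
  obtain ⟨e1, e2⟩ := pv_fix_replace_id t w (hid w hw)
  rcases hcase with ⟨ha, hb⟩ | ⟨ha, hb⟩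
  · subst ha; subst hb
    have := pv_replace_lt_of_infix t.toList [a, PySem.Chars.upperChar a] (by simp) hinf
    rw [e1] at this
    omega
  · subst ha; subst hb
    have := pv_replace_lt_of_infix t.toList [PySem.Chars.upperChar b, b] (by simp) hinf
    rw [e2] at this
    omega

theorem pv_irr_reverse {l : List Char} (h : pvIrr l) : pvIrr l.reverse := by
  unfold pvIrr at h ⊢
  rw [List.isChain_reverse]
  exact h.imp (fun {a b} hab => by rw [pv_reacts_comm]; exact hab)

theorem pv_red_of_irr (t : String) (h : pvIrr t.toList) :
    List.foldl pvStack [] t.toList = t.toList.reverse := by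
  have := pv_nf t.toList [] (by simpa using pv_irr_reverse h)
  simpa using this

theorem pv_loop_eq : ∀ (n : Nat) (nt t : String),
    2 * t.toList.length + (if nt = t then 0 else 1) ≤ n →
    (nt = t → pvIrr t.toList) →
    pvLoop nt t = ((t.toList.foldl pvStack []).length : Int) := by
  intro n
  induction n with
  | zero =>
    intro nt t hm hirr
    by_cases h : nt = t
    · rw [pvLoop, if_pos h]
      rw [pv_red_of_irr t (hirr h)]
      simp [PySem.Str.len, h]
    · rw [if_neg h] at hm; omega
  | succ m ih =>
    intro nt t hm hirr
    by_cases h : nt = t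
    · rw [pvLoop, if_pos h]
      rw [pv_red_of_irr t (hirr h)]
      simp [PySem.Str.len, h]
    · rw [pvLoop, if_neg h]
      rw [if_neg h] at hm
      have hnext : 2 * (pvPass t).toList.length + (if t = pvPass t then 0 else 1) ≤ m := by
        by_cases hp : t = pvPass t
        · rw [if_pos hp, ← hp]; omega
        · rw [if_neg hp]
          have := pv_pass_len_lt t (fun e => hp e.symm)
          omega
      have hirr' : t = pvPass t → pvIrr (pvPass t).toList := by
        intro hp
        have := pv_fix_irr t hp.symm
        rwa [← hp]
      rw [ih t (pvPass t) hnext hirr']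
      rw [pv_pass_red t [] List.IsChain.nil]

-- ===== VERDICT (by name: the statement is the Claim_ definition above) =====
theorem reacted_polymer_length_spec : Claim_equal_reacted_polymer_length := by
  intro text _
  unfold Spec_reacted_polymer_length reacted_polymer_length reacted_polymer_length_alt
  exact pv_loop_eq (2 * text.toList.length + (if ("" : String) = text then 0 else 1))
    "" text le_rfl (fun h => by rw [← h]; exact List.IsChain.nil)
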